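-- pv_equiv track=rewrite | github.com/emagnusandersson/buvtpy | buvt.py | extractDivergingParents
-- ===== SOURCE A (Python) =====
-- def extractDivergingParents(strA,strB):
--   lA=len(strA); lB=len(strB); iLastSlash=None
--   lShortest=lA if(lA<lB) else lB
--   for i in range(-1, -lShortest, -1): # [-1, -2, ... -(lShortest-1)]
--     a=strA[i]; b=strB[i]
--     if(b!=a): break
--     if(a=='/'): iLastSlash=i
--   if(iLastSlash==None): return None, None  #, None
--   return strA[:iLastSlash], strB[:iLastSlash]  #, strA[iLastSlash-1:]
-- ===== SOURCE B (Python) =====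
-- def extractDivergingParents(strA, strB):
--     lA, lB = len(strA), len(strB)
--     n = lA if lA < lB else lB
--     k = 0
--     for t in range(n - 1):
--         if strA[lA - 1 - t] != strB[lB - 1 - t]:
--             break
--         k += 1
--     j = strA.find('/', lA - k)
--     if j < 0:
--         return None, None
--     return strA[:j], strB[:lB - lA + j]
-- ===== Notes on version B (the rewrite author's own statement) =====
-- stated objective: alternative
-- what changed: Replaces A's single interleaved backward scan that records the last matching slash in an accumulator with a two-phase decomposition: first compute the matched-suffix length k with a bounded while loop, then locate that slash with str.find on the suffix strA[lA-k:] and slice both strings at the translated absolute position.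
import Mathlib
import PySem

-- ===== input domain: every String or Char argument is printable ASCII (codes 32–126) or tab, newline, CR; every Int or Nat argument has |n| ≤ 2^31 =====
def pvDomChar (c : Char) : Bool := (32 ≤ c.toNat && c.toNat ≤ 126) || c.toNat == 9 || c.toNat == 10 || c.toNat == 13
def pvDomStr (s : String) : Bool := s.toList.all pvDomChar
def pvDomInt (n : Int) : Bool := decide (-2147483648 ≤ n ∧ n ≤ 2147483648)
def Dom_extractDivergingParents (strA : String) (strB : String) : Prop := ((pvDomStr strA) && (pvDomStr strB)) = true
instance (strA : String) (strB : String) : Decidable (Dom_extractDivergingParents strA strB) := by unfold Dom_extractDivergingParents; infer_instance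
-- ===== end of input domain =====

-- B replaces A's single interleaved backward scan by a two-phase decomposition (matched-suffix
-- length, then str.find on the suffix); same asymptotic cost ('alternative', not 'faster').

-- ===== PORT A =====
-- the 'for i in range(-1, -lShortest, -1)' loop; 'break' returns the accumulator unchanged
def pvALoop (strA strB : String) : List Int → Option Int → Option Int
  | [], acc => acc
  | i :: rest, acc =>
    match PySem.Str.pyGet? strA i, PySem.Str.pyGet? strB i with
    | some a, some b =>
      if b ≠ a then acc
      else pvALoop strA strB rest (if a = '/' then some i else acc)
    | _, _ => acc   -- unreachable: every index the range produces is in bounds for both strings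

def extractDivergingParents (strA : String) (strB : String) : Option String × Option String :=
  let lA : Int := PySem.Str.len strA
  let lB : Int := PySem.Str.len strB
  let lShortest : Int := if lA < lB then lA else lB
  match pvALoop strA strB (PySem.List.pyRange (-1) (-lShortest) (-1)) none with
  | none => (none, none)
  | some i => (some (PySem.Str.slice strA none (some i)), some (PySem.Str.slice strB none (some i)))

-- ===== PORT B =====
-- the "for t in range(n - 1): if mismatch: break; k += 1" loop of Source B; 'break' returns k
def pvBLoop (strA strB : String) (lA lB : Int) : List Int → Int → Int
  | [], k => k
  | t :: rest, k =>
    if PySem.Str.pyGet? strA (lA - 1 - t) ≠ PySem.Str.pyGet? strB (lB - 1 - t) then k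
    else pvBLoop strA strB lA lB rest (k + 1)

def extractDivergingParents_alt (strA : String) (strB : String) : Option String × Option String :=
  let lA : Int := PySem.Str.len strA
  let lB : Int := PySem.Str.len strB
  let n : Int := if lA < lB then lA else lB
  let k : Int := pvBLoop strA strB lA lB (PySem.List.pyRange 0 (n - 1) 1) 0
  let j : Int := PySem.Str.findFrom strA "/" (lA - k) none
  if j < 0 then (none, none)
  else (some (PySem.Str.slice strA none (some j)), some (PySem.Str.slice strB none (some (lB - lA + j))))

-- ===== PRECONDITION & SPEC =====
def Spec_extractDivergingParents (strA : String) (strB : String) (out : Option String × Option String) : Prop := out = extractDivergingParents_alt strA strB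
instance (strA : String) (strB : String) (out : Option String × Option String) : Decidable (Spec_extractDivergingParents strA strB out) := by unfold Spec_extractDivergingParents; infer_instance

-- ===== CLAIM (what is proved, stated in full; the proofs are below) =====
def Claim_equal_extractDivergingParents : Prop := ∀ (strA : String) (strB : String), Dom_extractDivergingParents strA strB → Spec_extractDivergingParents strA strB (extractDivergingParents strA strB)

-- ===== LEMMAS AND PROOFS =====

-- character compared at step t of the backward scan (t = 0 is the last character)
def pvCh (s : String) (t : Nat) : Char := s.toList.getD (s.toList.length - 1 - t) ' '

-- reference form of A's loop: fuel c, current step s, accumulator acc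
def pvScan (strA strB : String) : Nat → Nat → Option Int → Option Int
  | 0, _, acc => acc
  | c + 1, s, acc =>
    if pvCh strA s ≠ pvCh strB s then acc
    else pvScan strA strB c (s + 1) (if pvCh strA s = '/' then some (-((s : Int) + 1)) else acc)

-- matched-run length starting at step s, capped at c
def pvRun (strA strB : String) : Nat → Nat → Nat
  | 0, _ => 0
  | c + 1, s => if pvCh strA s = pvCh strB s then pvRun strA strB c (s + 1) + 1 else 0

-- largest step t in [s, s+c) with pvCh strA t = '/'
def pvLS (strA : String) : Nat → Nat → Option Nat
  | 0, _ => none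
  | c + 1, s => (pvLS strA c (s + 1)).or (if pvCh strA s = '/' then some s else none)

lemma pvRun_le (strA strB : String) : ∀ c s, pvRun strA strB c s ≤ c := by
  intro c
  induction c with
  | zero => intro s; simp [pvRun]
  | succ c ih =>
    intro s
    simp only [pvRun]
    split
    · exact Nat.succ_le_succ (ih _)
    · omega

lemma pvGet_neg (s : String) (t : Nat) (ht : t < s.toList.length) :
    PySem.Str.pyGet? s (-((t : Int) + 1)) = some (pvCh s t) := by
  simp only [PySem.Str.pyGet?, PySem.Chars.pyGet?_eq_listPyGet?, PySem.List.pyGet?,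
    PySem.List.pyIdx?]
  rw [if_neg (by omega), if_pos (by omega)]
  have h1 : (-(-((t : Int) + 1))).toNat = t + 1 := by omega
  rw [h1]
  simp only [Option.bind_some]
  rw [List.getElem?_eq_getElem (by omega)]
  simp only [pvCh, List.getD_eq_getElem?_getD]
  rw [List.getElem?_eq_getElem (by omega)]
  simp only [Option.getD_some, Option.some.injEq]
  congr 1
  omega

lemma pvGet_pos (s : String) (t : Nat) (ht : t < s.toList.length) :
    PySem.Str.pyGet? s ((s.toList.length : Int) - 1 - (t : Int)) = some (pvCh s t) := by
  simp only [PySem.Str.pyGet?, PySem.Chars.pyGet?_eq_listPyGet?, PySem.List.pyGet?,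
    PySem.List.pyIdx?]
  rw [if_pos (by omega), if_pos (by omega)]
  have h1 : ((s.toList.length : Int) - 1 - (t : Int)).toNat = s.toList.length - 1 - t := by omega
  rw [h1]
  simp only [Option.bind_some]
  rw [List.getElem?_eq_getElem (by omega)]
  simp only [pvCh, List.getD_eq_getElem?_getD]
  rw [List.getElem?_eq_getElem (by omega)]
  simp

lemma pvRange_neg (M : Nat) :
    PySem.List.pyRange (-1) (-(M : Int)) (-1) = (List.range' 0 (M - 1)).map (fun (t : Nat) => -((t : Int) + 1)) := by
  simp only [PySem.List.pyRange]
  rw [if_neg (by omega), if_neg (by omega : ¬ ((0 : Int) < -1))]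
  have hc : (if (-(M : Int)) < -1 then (((-1 : Int) - (-(M : Int)) + -(-1) - 1) / -(-1)).toNat else 0) = M - 1 := by
    split_ifs with h
    · simp only [neg_neg]
      have e : (-1 : Int) - (-(M : Int)) + 1 - 1 = (M : Int) - 1 := by ring
      rw [e]
      omega
    · omega
  rw [hc, ← List.range_eq_range']
  apply List.map_congr_left
  intro t _
  omega

lemma pvALoop_eq_scan (strA strB : String) :
    ∀ c s acc, s + c ≤ min strA.toList.length strB.toList.length →
    pvALoop strA strB ((List.range' s c).map (fun (t : Nat) => -((t : Int) + 1))) acc = pvScan strA strB c s acc := by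
  intro c
  induction c with
  | zero => intro s acc h; simp [pvALoop, pvScan]
  | succ c ih =>
    intro s acc h
    have hsA : s < strA.toList.length := by omega
    have hsB : s < strB.toList.length := by omega
    rw [List.range'_succ, List.map_cons]
    simp only [pvALoop, pvGet_neg strA s hsA, pvGet_neg strB s hsB]
    by_cases hc : pvCh strA s = pvCh strB s
    · rw [if_neg (show ¬ (pvCh strB s ≠ pvCh strA s) by simp [hc]), pvScan,
        if_neg (show ¬ (pvCh strA s ≠ pvCh strB s) by simp [hc])]
      exact ih (s + 1) _ (by omega)
    · rw [if_pos (show pvCh strB s ≠ pvCh strA s from fun hEq => hc hEq.symm), pvScan, if_pos hc]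

lemma pvRange_pos (M : Nat) :
    PySem.List.pyRange 0 ((M : Int) - 1) 1 = (List.range' 0 (M - 1)).map (fun (t : Nat) => (t : Int)) := by
  simp only [PySem.List.pyRange]
  rw [if_neg (by omega), if_pos (by omega : (0 : Int) < 1)]
  have hc : (if (0 : Int) < (M : Int) - 1 then (((M : Int) - 1 - 0 + 1 - 1) / 1).toNat else 0) = M - 1 := by
    split_ifs with h
    · simp only [sub_zero]
      have e : (M : Int) - 1 + 1 - 1 = (M : Int) - 1 := by ring
      rw [e]
      omega
    · omega
  rw [hc, ← List.range_eq_range']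
  apply List.map_congr_left
  intro t _
  omega

lemma pvBLoop_eq_run (strA strB : String) :
    ∀ c s (k0 : Int), s + c ≤ min strA.toList.length strB.toList.length - 1 →
    pvBLoop strA strB (strA.toList.length : Int) (strB.toList.length : Int)
      ((List.range' s c).map (fun (t : Nat) => (t : Int))) k0
      = k0 + ((pvRun strA strB c s : Nat) : Int) := by
  intro c
  induction c with
  | zero => intro s k0 h; simp [pvBLoop, pvRun]
  | succ c ih =>
    intro s k0 h
    have hsA : s < strA.toList.length := by omega
    have hsB : s < strB.toList.length := by omega
    rw [List.range'_succ, List.map_cons]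
    simp only [pvBLoop, pvGet_pos strA s hsA, pvGet_pos strB s hsB]
    by_cases hc : pvCh strA s = pvCh strB s
    · rw [if_neg (show ¬ (some (pvCh strA s) ≠ some (pvCh strB s)) by simp [hc]),
        ih (s + 1) (k0 + 1) (by omega)]
      simp only [pvRun, if_pos hc]
      push_cast
      ring
    · rw [if_pos (show (some (pvCh strA s) ≠ some (pvCh strB s)) by simp [hc])]
      simp [pvRun, hc]

lemma pvScan_eq_LS (strA strB : String) :
    ∀ c s acc, pvScan strA strB c s acc =
      match pvLS strA (pvRun strA strB c s) s with
      | some t => some (-((t : Int) + 1))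
      | none => acc := by
  intro c
  induction c with
  | zero => intro s acc; simp [pvScan, pvRun, pvLS]
  | succ c ih =>
    intro s acc
    by_cases hc : pvCh strA s = pvCh strB s
    · rw [pvScan, if_neg (by simp [hc]), ih (s + 1)]
      simp only [pvRun, if_pos hc, pvLS]
      cases h : pvLS strA (pvRun strA strB c (s + 1)) (s + 1) with
      | some t => simp
      | none => by_cases hs : pvCh strA s = '/' <;> simp [hs]
    · rw [pvScan, if_pos hc]
      simp [pvRun, hc, pvLS]

lemma pvLS_none (strA : String) : ∀ c s, pvLS strA c s = none →
    ∀ u, s ≤ u → u < s + c → pvCh strA u ≠ '/' := by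
  intro c
  induction c with
  | zero => intro s _ u h1 h2; omega
  | succ c ih =>
    intro s h u h1 h2
    simp only [pvLS] at h
    cases hin : pvLS strA c (s + 1) with
    | some t' => rw [hin, Option.some_or] at h; cases h
    | none =>
      rw [hin, Option.none_or] at h
      split_ifs at h with hs
      by_cases hu : u = s
      · subst hu; exact hs
      · exact ih (s + 1) hin u (by omega) (by omega)

lemma pvLS_some (strA : String) : ∀ c s t, pvLS strA c s = some t →
    s ≤ t ∧ t < s + c ∧ pvCh strA t = '/' ∧ ∀ u, t < u → u < s + c → pvCh strA u ≠ '/' := by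
  intro c
  induction c with
  | zero => intro s t h; simp [pvLS] at h
  | succ c ih =>
    intro s t h
    simp only [pvLS] at h
    cases hin : pvLS strA c (s + 1) with
    | some t' =>
      rw [hin, Option.some_or] at h
      have h' : t' = t := Option.some.inj h
      subst h'
      obtain ⟨h1, h2, h3, h4⟩ := ih (s + 1) t' hin
      exact ⟨by omega, by omega, h3, fun u hu1 hu2 => h4 u hu1 (by omega)⟩
    | none =>
      rw [hin, Option.none_or] at h
      split_ifs at h with hs
      have h' : s = t := Option.some.inj h
      subst h'
      exact ⟨le_refl _, by omega, hs,
        fun u hu1 hu2 => pvLS_none strA c (s + 1) hin u (by omega) (by omega)⟩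

lemma pvFind_go_single (c : Char) :
    ∀ (l : List Char) (k : Nat), PySem.Chars.find.go [c] l k =
      match l.findIdx? (fun x => x == c) with
      | some q => ((k + q : Nat) : Int)
      | none => -1 := by
  intro l
  induction l with
  | nil => intro k; simp [PySem.Chars.find.go]
  | cons h t ih =>
    intro k
    rw [PySem.Chars.find.go]
    by_cases hc : h = c
    · subst hc
      simp [List.isPrefixOf, List.findIdx?_cons]
    · have hpre : List.isPrefixOf [c] (h :: t) = false := by
        simp [List.isPrefixOf]
        exact fun hEq => (hc hEq.symm)
      rw [hpre]
      simp only [Bool.false_eq_true, if_false]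
      rw [ih (k + 1), List.findIdx?_cons]
      have hb : (h == c) = false := by simp [hc]
      rw [hb]
      simp only [Bool.false_eq_true, if_false]
      cases hf : t.findIdx? (fun x => x == c) with
      | some q =>
        simp only [Option.map_some]
        push_cast
        ring
      | none => simp

lemma pvS_getElem (strA : String) (r : Nat) (hr : r ≤ strA.toList.length)
    (q : Nat) (hq : q < r) :
    (strA.toList.drop (strA.toList.length - r))[q]'(by rw [List.length_drop]; omega) = pvCh strA (r - 1 - q) := by
  rw [List.getElem_drop]
  simp only [pvCh, List.getD_eq_getElem?_getD]
  rw [List.getElem?_eq_getElem (by omega)]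
  simp only [Option.getD_some]
  congr 1
  omega

lemma pvLS_eq_findIdx (strA : String) (r : Nat) (hr : r ≤ strA.toList.length) :
    pvLS strA r 0 =
      ((strA.toList.drop (strA.toList.length - r)).findIdx? (fun x => x == '/')).map (fun q => r - 1 - q) := by
  cases hf : (strA.toList.drop (strA.toList.length - r)).findIdx? (fun x => x == '/') with
  | none =>
    cases hl : pvLS strA r 0 with
    | none => simp
    | some t =>
      obtain ⟨-, h2, h3, -⟩ := pvLS_some strA r 0 t hl
      exfalso
      have hq : r - 1 - t < r := by omega
      have hmem := List.findIdx?_eq_none_iff.mp hf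
        ((strA.toList.drop (strA.toList.length - r))[r - 1 - t]'(by rw [List.length_drop]; omega))
        (List.getElem_mem _)
      rw [pvS_getElem strA r hr (r - 1 - t) hq] at hmem
      have ht : r - 1 - (r - 1 - t) = t := by omega
      rw [ht, h3] at hmem
      simp at hmem
  | some q =>
    obtain ⟨hql0, hpq, hmin⟩ := List.findIdx?_eq_some_iff_getElem.mp hf
    rw [List.length_drop] at hql0
    have hql : q < r := by omega
    rw [pvS_getElem strA r hr q hql] at hpq
    have hslash : pvCh strA (r - 1 - q) = '/' := by simpa using hpq
    cases hl : pvLS strA r 0 with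
    | none =>
      exfalso
      exact pvLS_none strA r 0 hl (r - 1 - q) (by omega) (by omega) hslash
    | some t =>
      obtain ⟨-, h2, h3, h4⟩ := pvLS_some strA r 0 t hl
      have hteq : t = r - 1 - q := by
        by_contra hne
        rcases Nat.lt_or_ge t (r - 1 - q) with hlt | hge
        · exact h4 (r - 1 - q) hlt (by omega) hslash
        · have hlt2 : r - 1 - t < q := by omega
          have hmm := hmin (r - 1 - t) hlt2
          rw [pvS_getElem strA r hr (r - 1 - t) (by omega)] at hmm
          have htt : r - 1 - (r - 1 - t) = t := by omega
          rw [htt, h3] at hmm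
          simp at hmm
      rw [Option.map_some]
      rw [hteq]

-- ===== VERDICT (by name: the statement is the Claim_ definition above) =====
theorem extractDivergingParents_spec : Claim_equal_extractDivergingParents := by
  unfold Claim_equal_extractDivergingParents
  intro strA strB _
  unfold Spec_extractDivergingParents extractDivergingParents extractDivergingParents_alt
  simp only [PySem.Str.len]
  set al := strA.toList.length with hal
  set bl := strB.toList.length with hbl
  set M := min al bl with hM
  have hMal : M ≤ al := Nat.min_le_left _ _
  have hMbl : M ≤ bl := Nat.min_le_right _ _
  have hshort : (if (al : Int) < (bl : Int) then (al : Int) else (bl : Int)) = ((M : Nat) : Int) := by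
    split_ifs with h <;> omega
  rw [hshort]
  set k := pvRun strA strB (M - 1) 0 with hk
  have hkm : k ≤ M - 1 := pvRun_le strA strB (M - 1) 0
  have hkal : k ≤ al := by omega
  -- A side: the loop computes the last matching slash step
  rw [pvRange_neg M, pvALoop_eq_scan strA strB (M - 1) 0 none (by omega),
    pvScan_eq_LS strA strB (M - 1) 0 none, ← hk,
    pvLS_eq_findIdx strA k hkal]
  -- B side: the for loop computes k
  have hB : pvBLoop strA strB (al : Int) (bl : Int) (PySem.List.pyRange 0 ((M : Int) - 1) 1) 0 = ((k : Nat) : Int) := by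
    rw [pvRange_pos M, pvBLoop_eq_run strA strB (M - 1) 0 0 (by omega)]
    omega
  rw [hB]
  -- the find call
  have hfind : PySem.Str.findFrom strA "/" ((al : Int) - ((k : Nat) : Int)) none
      = PySem.Chars.findFrom strA.toList ['/'] (((al - k : Nat)) : Int) none := by
    simp only [PySem.Str.findFrom]
    have hsub : ("/" : String).toList = ['/'] := rfl
    rw [hsub]
    congr 1
    omega
  rw [hfind, PySem.Chars.findFrom_natCast strA.toList ['/'] (al - k) (by omega)]
  cases hf : (strA.toList.drop (al - k)).findIdx? (fun x => x == '/') with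
  | none =>
    have hgo : PySem.Chars.find (strA.toList.drop (al - k)) ['/'] = -1 := by
      rw [PySem.Chars.find, pvFind_go_single '/' (strA.toList.drop (al - k)) 0, hf]
    rw [hgo]
    simp
  | some q =>
    have hgo : PySem.Chars.find (strA.toList.drop (al - k)) ['/'] = ((q : Nat) : Int) := by
      rw [PySem.Chars.find, pvFind_go_single '/' (strA.toList.drop (al - k)) 0, hf]
      simp
    have hql : q < k := by
      obtain ⟨hq1, -, -⟩ := List.findIdx?_eq_some_iff_getElem.mp hf
      rw [List.length_drop] at hq1
      omega
    rw [hgo]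
    rw [if_neg (by omega : ¬ ((q : Int) = -1))]
    simp only [Option.map_some]
    rw [if_neg (by omega : ¬ (((al - k : Nat) : Int) + (q : Int) < 0))]
    have hsliceA : PySem.Str.slice strA none (some (-(((k - 1 - q : Nat) : Int) + 1)))
        = PySem.Str.slice strA none (some (((al - k : Nat) : Int) + (q : Int))) := by
      simp only [PySem.Str.slice]
      congr 1
      simp only [PySem.Chars.slice_eq_listSlice]
      have e1 : (-(((k - 1 - q : Nat) : Int) + 1)) = -(((k - q : Nat) : Int)) := by omega
      have e2 : (((al - k : Nat) : Int) + (q : Int)) = (((al - k + q : Nat) : Int)) := by omega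
      rw [e1, e2, PySem.List.slice_to_neg_natCast strA.toList (k - q) (by omega),
        PySem.List.slice_to_natCast]
      congr 1
      omega
    have hsliceB : PySem.Str.slice strB none (some (-(((k - 1 - q : Nat) : Int) + 1)))
        = PySem.Str.slice strB none (some ((bl : Int) - (al : Int) + (((al - k : Nat) : Int) + (q : Int)))) := by
      simp only [PySem.Str.slice]
      congr 1
      simp only [PySem.Chars.slice_eq_listSlice]
      have e1 : (-(((k - 1 - q : Nat) : Int) + 1)) = -(((k - q : Nat) : Int)) := by omega
      have e2 : ((bl : Int) - (al : Int) + (((al - k : Nat) : Int) + (q : Int))) = (((bl - k + q : Nat) : Int)) := by omega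
      rw [e1, e2, PySem.List.slice_to_neg_natCast strB.toList (k - q) (by omega),
        PySem.List.slice_to_natCast]
      congr 1
      omega
    rw [hsliceA, hsliceB]
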